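-- pv_equiv track=rewrite | github.com/NickJohnson97/machine-learning-CISC-352 | nqueens/nqueens.py | set_board
-- ===== SOURCE A (Python) =====
-- def set_board(n):
--     # Set board using basic heuristic
--     if n < 4:
--         return False
--
--     board = []
--     for i in range(2,n+1,2):
--         board.append(i)
--     for i in range(1,n+1,2):
--         board.append(i)
--
--     return board
-- ===== SOURCE B (Python) =====
-- def set_board(n):
--     # Same heuristic board; one branching pass partitioning 1..n by parity,
--     # then concatenating evens before odds (alternative decomposition).
--     if n < 4:
--         return False
--     evens = []
--     odds = []
--     for i in range(1, n + 1):
--         if i % 2 == 0: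
--             evens.append(i)
--         else:
--             odds.append(i)
--     return evens + odds
-- ===== Notes on version B (the rewrite author's own statement) =====
-- stated objective: alternative
-- what changed: Replaces A's two unconditional step-2 range loops with a single pass over range(1, n+1) that partitions values by parity into evens/odds lists and concatenates them. Pre_ excludes n < 4, on which A returns the bool False instead of a list (outside the declared Option (List Int) return type).
-- outside the precondition, e.g. on set_board(2): A returns False, B returns False
import Mathlib
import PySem

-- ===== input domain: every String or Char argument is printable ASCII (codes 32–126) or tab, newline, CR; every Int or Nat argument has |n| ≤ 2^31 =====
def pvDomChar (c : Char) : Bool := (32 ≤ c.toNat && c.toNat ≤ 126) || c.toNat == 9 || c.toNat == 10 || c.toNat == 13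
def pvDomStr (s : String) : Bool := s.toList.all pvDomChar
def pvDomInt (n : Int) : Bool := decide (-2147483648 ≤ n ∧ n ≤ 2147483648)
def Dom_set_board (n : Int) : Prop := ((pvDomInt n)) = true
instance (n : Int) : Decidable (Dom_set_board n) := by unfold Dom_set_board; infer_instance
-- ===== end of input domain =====

-- B replaces A's two unconditional step-2 range loops with one branching pass over
-- range(1, n+1) that partitions by parity, then concatenates evens ++ odds (alternative decomposition).


-- ===== PORT A =====
-- 'return False' on n < 4 is rendered as none (the non-list result).
def set_board (n : Int) : Option (List Int) :=
  if n < 4 then none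
  else
    let board : List Int := []
    let board := (PySem.List.pyRange 2 (n+1) 2).foldl (fun acc i => acc ++ [i]) board
    let board := (PySem.List.pyRange 1 (n+1) 2).foldl (fun acc i => acc ++ [i]) board
    some board

-- ===== PORT B =====
def set_board_alt (n : Int) : Option (List Int) :=
  if n < 4 then none
  else
    let p := (PySem.List.pyRange 1 (n+1) 1).foldl
      (fun (acc : List Int × List Int) i =>
        if PySem.Int.mod i 2 == 0 then (acc.1 ++ [i], acc.2) else (acc.1, acc.2 ++ [i]))
      ([], [])
    some (p.1 ++ p.2)

-- ===== PRECONDITION & SPEC =====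
-- Pre_ excludes n < 4, on which A 'return False' — a bool, not a value of the declared
-- Option (List Int) type (both ports render that non-list branch as none).
def Pre_set_board (n : Int) : Prop := 4 ≤ n
instance (n : Int) : Decidable (Pre_set_board n) := by unfold Pre_set_board; infer_instance
def pvWitness_set_board : Int := (7)

def Spec_set_board (n : Int) (out : Option (List Int)) : Prop := out = set_board_alt n
instance (n : Int) (out : Option (List Int)) : Decidable (Spec_set_board n out) := by unfold Spec_set_board; infer_instance

-- ===== CLAIM (what is proved, stated in full; the proofs are below) =====
def Claim_equal_set_board : Prop := ∀ (n : Int), Dom_set_board n → Pre_set_board n → Spec_set_board n (set_board n)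

-- ===== LEMMAS AND PROOFS =====

-- append-fold is concatenation
theorem pv_foldl_append (l : List Int) (init : List Int) :
    l.foldl (fun acc i => acc ++ [i]) init = init ++ l := by
  induction l generalizing init with
  | nil => simp
  | cons x xs ih => simp [List.foldl, ih]

-- B's partitioning fold computes the two filters
theorem pv_foldl_partition (l : List Int) (e o : List Int) :
    l.foldl
      (fun (acc : List Int × List Int) i =>
        if PySem.Int.mod i 2 == 0 then (acc.1 ++ [i], acc.2) else (acc.1, acc.2 ++ [i]))
      (e, o)
    = (e ++ l.filter (fun i => PySem.Int.mod i 2 == 0),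
       o ++ l.filter (fun i => !(PySem.Int.mod i 2 == 0))) := by
  induction l generalizing e o with
  | nil => simp
  | cons x xs ih =>
    rw [List.foldl_cons, List.filter_cons, List.filter_cons]
    by_cases h : (PySem.Int.mod x 2 == 0) = true
    · rw [if_pos h, if_pos h, ih, h]
      simp
    · rw [if_neg h, ih, if_neg h]
      rw [Bool.not_eq_true] at h
      rw [h]
      simp

-- strictly increasing lists with the same members are equal
theorem pv_eq_of_sorted_mem (l₁ l₂ : List Int)
    (h₁ : l₁.Pairwise (· < ·)) (h₂ : l₂.Pairwise (· < ·))
    (hm : ∀ x, x ∈ l₁ ↔ x ∈ l₂) : l₁ = l₂ := by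
  have n₁ : l₁.Nodup := h₁.imp (fun h => ne_of_lt h)
  have n₂ : l₂.Nodup := h₂.imp (fun h => ne_of_lt h)
  have hp : l₁.Perm l₂ := (List.perm_ext_iff_of_nodup n₁ n₂).mpr hm
  exact List.Perm.eq_of_pairwise (fun a b _ _ h1 h2 => le_antisymm h1 h2)
    (h₁.imp (fun h => le_of_lt h)) (h₂.imp (fun h => le_of_lt h)) hp

theorem pv_mod_two (a : Int) : PySem.Int.mod a 2 = a % 2 := by
  simp [PySem.Int.mod, Int.fmod_eq_emod]

theorem pv_pairwise_pyRange2 (a b : Int) :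
    (PySem.List.pyRange a b 2).Pairwise (· < ·) := by
  rw [PySem.List.pyRange_of_pos a b (by norm_num)]
  rw [List.pairwise_map]
  exact (List.pairwise_lt_range).imp (by intro i j h; omega)

theorem pv_filter_even (b : Int) :
    (PySem.List.pyRange 1 b 1).filter (fun i => PySem.Int.mod i 2 == 0)
      = PySem.List.pyRange 2 b 2 := by
  apply pv_eq_of_sorted_mem
  · exact (PySem.List.pairwise_lt_pyRange_one 1 b).filter _
  · exact pv_pairwise_pyRange2 2 b
  · intro x
    simp only [List.mem_filter, PySem.List.mem_pyRange_one,
      PySem.List.mem_pyRange_iff_of_pos (by norm_num : (0:Int) < 2),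
      pv_mod_two, beq_iff_eq]
    omega

theorem pv_filter_odd (b : Int) :
    (PySem.List.pyRange 1 b 1).filter (fun i => !(PySem.Int.mod i 2 == 0))
      = PySem.List.pyRange 1 b 2 := by
  apply pv_eq_of_sorted_mem
  · exact (PySem.List.pairwise_lt_pyRange_one 1 b).filter _
  · exact pv_pairwise_pyRange2 1 b
  · intro x
    simp only [List.mem_filter, PySem.List.mem_pyRange_one,
      PySem.List.mem_pyRange_iff_of_pos (by norm_num : (0:Int) < 2),
      pv_mod_two, Bool.not_eq_true', beq_eq_false_iff_ne, ne_eq]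
    omega

-- ===== VERDICT (by name: the statement is the Claim_ definition above) =====
theorem set_board_spec : Claim_equal_set_board := by
  intro n _ _
  unfold Spec_set_board set_board set_board_alt
  by_cases h : n < 4
  · simp [h]
  · simp only [h, if_false]
    rw [pv_foldl_append, pv_foldl_append, pv_foldl_partition,
      pv_filter_even, pv_filter_odd]
    simp
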